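-- pv_equiv track=rewrite | github.com/maxymkuz/cs_first_semester | Hmwrk3/numberssum.py | numbers_sum
-- ===== SOURCE A (Python) =====
-- def numbers_sum(n):
--     """
--     int -> int
--     returnd a sum of n elems
--     >>> numbers_sum(5)
--     25
--     >>> numbers_sum(1)
--     3
--     """
--     nar = [1, 1, 1]
--     luc = [2, 1, 3]
--     if n < 1:
--         return 0
--     if n == 1:
--         return 3
--     if n == 2:
--         return 5
--     for i in range(3, n + 1):
--         nar.append(nar[i-1] + nar[i-3])
--         luc.append(luc[i-1] + luc[i-2])
--     return sum(nar) + sum(luc)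
-- ===== SOURCE B (Python) =====
-- def _mat_mul3(x, y):
--     (a, b, c, d, e, f, g, h, i) = x
--     (j, k, l, m, o, p, q, r, s) = y
--     return (a*j + b*m + c*q, a*k + b*o + c*r, a*l + b*p + c*s,
--             d*j + e*m + f*q, d*k + e*o + f*r, d*l + e*p + f*s,
--             g*j + h*m + i*q, g*k + h*o + i*r, g*l + h*p + i*s)
--
--
-- def _mat_pow3(m, k):
--     if k == 0:
--         return (1, 0, 0, 0, 1, 0, 0, 0, 1)
--     h = _mat_pow3(_mat_mul3(m, m), k // 2)
--     return _mat_mul3(m, h) if k % 2 == 1 else h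
--
--
-- def _mat_mul2(x, y):
--     (a, b, c, d) = x
--     (e, f, g, h) = y
--     return (a*e + b*g, a*f + b*h, c*e + d*g, c*f + d*h)
--
--
-- def _mat_pow2(m, k):
--     if k == 0:
--         return (1, 0, 0, 1)
--     h = _mat_pow2(_mat_mul2(m, m), k // 2)
--     return _mat_mul2(m, h) if k % 2 == 1 else h
--
--
-- def numbers_sum(n):
--     # Narayana a_0=a_1=a_2=1, a_k=a_{k-1}+a_{k-3}; Lucas l_0=2, l_1=1, l_k=l_{k-1}+l_{k-2}.
--     # Telescoping: sum_{i<=n} a_i = a_{n+3}-1 and sum_{i<=n} l_i = l_{n+2}-1,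
--     # and a_{n+3}, l_{n+2} come from O(log n) matrix exponentiation.
--     if n < 1:
--         return 0
--     if n == 1:
--         return 3
--     if n == 2:
--         return 5
--     p, q, r, _, _, _, _, _, _ = _mat_pow3((1, 0, 1, 1, 0, 0, 0, 1, 0), n + 1)
--     a = p + q + r            # a_{n+3} = matrix^{n+1} applied to (a_2, a_1, a_0) = (1,1,1)
--     u, v, _, _ = _mat_pow2((1, 1, 1, 0), n + 1)
--     l = u + v * 2            # l_{n+2} = matrix^{n+1} applied to (l_1, l_0) = (1, 2)
--     return a + l - 2
-- ===== Notes on version B (the rewrite author's own statement) =====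
-- stated objective: faster
-- what changed: Replaced the O(n) loop that materialises both sequences in lists and sums them by telescoping identities (sum of the Narayana prefix is its third-later term minus one, likewise for Lucas) evaluated with binary matrix exponentiation (a three-by-three matrix for Narayana, two-by-two for Lucas): O(log n) big-int multiplications instead of n loop iterations; intended as faster and measured roughly twentyfold to fortyfold at the largest sizes A finishes, though at sizes where the exact result itself has about a hundred million bits both eventually exceed the time budget.
import Mathlib
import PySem

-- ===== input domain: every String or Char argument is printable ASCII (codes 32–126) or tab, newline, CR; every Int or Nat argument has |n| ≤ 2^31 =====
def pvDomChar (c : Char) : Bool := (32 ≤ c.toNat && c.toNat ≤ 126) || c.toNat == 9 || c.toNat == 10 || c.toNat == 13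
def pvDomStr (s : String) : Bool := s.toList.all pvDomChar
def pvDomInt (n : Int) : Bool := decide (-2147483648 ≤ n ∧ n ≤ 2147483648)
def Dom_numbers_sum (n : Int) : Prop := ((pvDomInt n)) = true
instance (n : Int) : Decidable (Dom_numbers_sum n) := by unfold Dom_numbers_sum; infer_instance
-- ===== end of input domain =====

-- B replaces A's O(n) list-building loop by telescoped prefix sums evaluated with O(log n)-multiplication binary matrix exponentiation; intended as faster, measured roughly twentyfold at the largest sizes A finishes.


-- ===== PORT A =====
-- one step of A's for-loop: append nar[i-1]+nar[i-3] to nar and luc[i-1]+luc[i-2] to luc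
def stepA (st : List Int × List Int) (i : Int) : List Int × List Int :=
  (st.1 ++ [PySem.List.pyGetD st.1 (i - 1) 0 + PySem.List.pyGetD st.1 (i - 3) 0],
   st.2 ++ [PySem.List.pyGetD st.2 (i - 1) 0 + PySem.List.pyGetD st.2 (i - 2) 0])

def numbers_sum (n : Int) : Int :=
  if n < 1 then 0
  else if n = 1 then 3
  else if n = 2 then 5
  else
    let st := (PySem.List.pyRange 3 (n + 1) 1).foldl stepA ([1, 1, 1], [2, 1, 3])
    st.1.sum + st.2.sum

-- ===== PORT B =====
abbrev M3 := Int × Int × Int × Int × Int × Int × Int × Int × Int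
abbrev M2 := Int × Int × Int × Int

def matMul3 (x y : M3) : M3 :=
  match x, y with
  | (a, b, c, d, e, f, g, h, i), (j, k, l, m, o, p, q, r, s) =>
    (a*j + b*m + c*q, a*k + b*o + c*r, a*l + b*p + c*s,
     d*j + e*m + f*q, d*k + e*o + f*r, d*l + e*p + f*s,
     g*j + h*m + i*q, g*k + h*o + i*r, g*l + h*p + i*s)

def matPow3 (m : M3) (k : Nat) : M3 :=
  if h : k = 0 then (1, 0, 0, 0, 1, 0, 0, 0, 1)
  else
    let hh := matPow3 (matMul3 m m) (k / 2)
    if k % 2 = 1 then matMul3 m hh else hh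
termination_by k
decreasing_by omega

def matMul2 (x y : M2) : M2 :=
  match x, y with
  | (a, b, c, d), (e, f, g, h) =>
    (a*e + b*g, a*f + b*h, c*e + d*g, c*f + d*h)

def matPow2 (m : M2) (k : Nat) : M2 :=
  if h : k = 0 then (1, 0, 0, 1)
  else
    let hh := matPow2 (matMul2 m m) (k / 2)
    if k % 2 = 1 then matMul2 m hh else hh
termination_by k
decreasing_by omega

def numbers_sum_alt (n : Int) : Int :=
  if n < 1 then 0
  else if n = 1 then 3
  else if n = 2 then 5
  else
    let t := matPow3 (1, 0, 1, 1, 0, 0, 0, 1, 0) (n + 1).toNat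
    let a := t.1 + t.2.1 + t.2.2.1
    let t2 := matPow2 (1, 1, 1, 0) (n + 1).toNat
    let l := t2.1 + t2.2.1 * 2
    a + l - 2

-- ===== PRECONDITION & SPEC =====
def Spec_numbers_sum (n : Int) (out : Int) : Prop := out = numbers_sum_alt n
instance (n : Int) (out : Int) : Decidable (Spec_numbers_sum n out) := by unfold Spec_numbers_sum; infer_instance

-- ===== CLAIM (what is proved, stated in full; the proofs are below) =====
def Claim_equal_numbers_sum : Prop := ∀ (n : Int), Dom_numbers_sum n → Spec_numbers_sum n (numbers_sum n)

-- ===== LEMMAS AND PROOFS =====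

-- the two sequences A's lists hold: Narayana (1,1,1) and Lucas (2,1,3)
def narF : Nat → Int
  | 0 => 1
  | 1 => 1
  | 2 => 1
  | k + 3 => narF (k + 2) + narF k

def lucF : Nat → Int
  | 0 => 2
  | 1 => 1
  | k + 2 => lucF (k + 1) + lucF k

lemma narF_add3 (k : Nat) : narF (k + 3) = narF (k + 2) + narF k := by rfl
lemma lucF_add2 (k : Nat) : lucF (k + 2) = lucF (k + 1) + lucF k := by rfl

-- A's fold builds exactly the value tables of narF and lucF
lemma foldA (m : Nat) (hm : 2 ≤ m) :
    (PySem.List.pyRange 3 ((m : Int) + 1) 1).foldl stepA ([1, 1, 1], [2, 1, 3])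
      = ((List.range (m + 1)).map narF, (List.range (m + 1)).map lucF) := by
  induction m, hm using Nat.le_induction with
  | base => decide
  | succ m hm ih =>
    have hb : (3 : Int) ≤ (m : Int) + 1 := by omega
    have hr : (PySem.List.pyRange 3 ((↑(m + 1) : Int) + 1) 1)
        = PySem.List.pyRange 3 ((m : Int) + 1) 1 ++ [(m : Int) + 1] := by
      push_cast
      exact PySem.List.pyRange_one_succ_right hb
    rw [hr, List.foldl_append, ih]
    obtain ⟨j, rfl⟩ : ∃ j, m = j + 2 := ⟨m - 2, by omega⟩
    have h1 : ((j : Int) + 2 + 1 - 1) = ((j + 2 : Nat) : Int) := by push_cast; ring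
    have h3 : ((j : Int) + 2 + 1 - 3) = ((j : Nat) : Int) := by ring
    have h2 : ((j : Int) + 2 + 1 - 2) = ((j + 1 : Nat) : Int) := by push_cast; ring
    simp only [List.foldl_cons, List.foldl_nil, stepA]
    push_cast
    rw [h1, h2, h3, PySem.List.pyGetD_natCast, PySem.List.pyGetD_natCast,
        PySem.List.pyGetD_natCast, PySem.List.pyGetD_natCast]
    rw [PySem.List.getD_map_range _ _ _ _ (by omega),
        PySem.List.getD_map_range _ _ _ _ (by omega),
        PySem.List.getD_map_range _ _ _ _ (by omega),
        PySem.List.getD_map_range _ _ _ _ (by omega)]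
    have hrn : List.range (j + 2 + 1 + 1) = List.range (j + 2 + 1) ++ [j + 3] := by
      simpa using List.range_succ (n := j + 3)
    rw [hrn]
    simp [narF_add3, lucF_add2]

-- telescoped prefix sums
lemma sumNar (m : Nat) : ((List.range (m + 1)).map narF).sum = narF (m + 3) - 1 := by
  induction m with
  | zero => decide
  | succ m ih =>
    rw [show m + 1 + 1 = (m + 1) + 1 from rfl, List.range_succ, List.map_append,
        List.sum_append, ih]
    simp [narF_add3 (m + 1)]
    ring

lemma sumLuc (m : Nat) : ((List.range (m + 1)).map lucF).sum = lucF (m + 2) - 1 := by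
  induction m with
  | zero => decide
  | succ m ih =>
    rw [show m + 1 + 1 = (m + 1) + 1 from rfl, List.range_succ, List.map_append,
        List.sum_append, ih]
    simp [lucF_add2 (m + 1)]
    ring

-- naive matrix powers (proof-side reference for the binary exponentiation in B)
def npow3 (m : M3) : Nat → M3
  | 0 => (1, 0, 0, 0, 1, 0, 0, 0, 1)
  | k + 1 => matMul3 m (npow3 m k)

def npow2 (m : M2) : Nat → M2
  | 0 => (1, 0, 0, 1)
  | k + 1 => matMul2 m (npow2 m k)

lemma matMul3_assoc (x y z : M3) : matMul3 (matMul3 x y) z = matMul3 x (matMul3 y z) := by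
  obtain ⟨a, b, c, d, e, f, g, h, i⟩ := x
  obtain ⟨j, k, l, m, o, p, q, r, s⟩ := y
  obtain ⟨t, u, v, w, x', y', z', a', b'⟩ := z
  simp only [matMul3, Prod.mk.injEq]
  refine ⟨by ring, by ring, by ring, by ring, by ring, by ring, by ring, by ring, by ring⟩

lemma matMul2_assoc (x y z : M2) : matMul2 (matMul2 x y) z = matMul2 x (matMul2 y z) := by
  obtain ⟨a, b, c, d⟩ := x
  obtain ⟨e, f, g, h⟩ := y
  obtain ⟨i, j, k, l⟩ := z
  simp only [matMul2, Prod.mk.injEq]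
  refine ⟨by ring, by ring, by ring, by ring⟩

lemma npow3_sq (m : M3) (j : Nat) : npow3 (matMul3 m m) j = npow3 m (2 * j) := by
  induction j with
  | zero => rfl
  | succ j ih =>
    rw [show 2 * (j + 1) = (2 * j + 1) + 1 by ring]
    simp only [npow3, ih, matMul3_assoc]

lemma npow2_sq (m : M2) (j : Nat) : npow2 (matMul2 m m) j = npow2 m (2 * j) := by
  induction j with
  | zero => rfl
  | succ j ih =>
    rw [show 2 * (j + 1) = (2 * j + 1) + 1 by ring]
    simp only [npow2, ih, matMul2_assoc]

lemma matPow3_eq (k : Nat) : ∀ m, matPow3 m k = npow3 m k := by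
  induction k using Nat.strong_induction_on with
  | _ k ih =>
    intro m
    rw [matPow3]
    by_cases h0 : k = 0
    · simp [h0, npow3]
    · simp only [h0, dite_false]
      rw [ih (k / 2) (by omega) (matMul3 m m), npow3_sq]
      by_cases hp : k % 2 = 1
      · simp only [hp, if_true]
        have hk : k = 2 * (k / 2) + 1 := by omega
        conv_rhs => rw [hk]
        simp [npow3]
      · simp only [hp, if_false]
        have hk : k = 2 * (k / 2) := by omega
        conv_rhs => rw [hk]

lemma matPow2_eq (k : Nat) : ∀ m, matPow2 m k = npow2 m k := by
  induction k using Nat.strong_induction_on with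
  | _ k ih =>
    intro m
    rw [matPow2]
    by_cases h0 : k = 0
    · simp [h0, npow2]
    · simp only [h0, dite_false]
      rw [ih (k / 2) (by omega) (matMul2 m m), npow2_sq]
      by_cases hp : k % 2 = 1
      · simp only [hp, if_true]
        have hk : k = 2 * (k / 2) + 1 := by omega
        conv_rhs => rw [hk]
        simp [npow2]
      · simp only [hp, if_false]
        have hk : k = 2 * (k / 2) := by omega
        conv_rhs => rw [hk]

def apply3 (m : M3) (v : Int × Int × Int) : Int × Int × Int :=
  (m.1 * v.1 + m.2.1 * v.2.1 + m.2.2.1 * v.2.2,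
   m.2.2.2.1 * v.1 + m.2.2.2.2.1 * v.2.1 + m.2.2.2.2.2.1 * v.2.2,
   m.2.2.2.2.2.2.1 * v.1 + m.2.2.2.2.2.2.2.1 * v.2.1 + m.2.2.2.2.2.2.2.2 * v.2.2)

def apply2 (m : M2) (v : Int × Int) : Int × Int :=
  (m.1 * v.1 + m.2.1 * v.2, m.2.2.1 * v.1 + m.2.2.2 * v.2)

lemma apply3_mul (x y : M3) (v : Int × Int × Int) :
    apply3 (matMul3 x y) v = apply3 x (apply3 y v) := by
  obtain ⟨a, b, c, d, e, f, g, h, i⟩ := x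
  obtain ⟨j, k, l, m, o, p, q, r, s⟩ := y
  obtain ⟨u, v1, v2⟩ := v
  simp only [matMul3, apply3, Prod.mk.injEq]
  refine ⟨by ring, by ring, by ring⟩

lemma apply2_mul (x y : M2) (v : Int × Int) :
    apply2 (matMul2 x y) v = apply2 x (apply2 y v) := by
  obtain ⟨a, b, c, d⟩ := x
  obtain ⟨e, f, g, h⟩ := y
  obtain ⟨u, w⟩ := v
  simp only [matMul2, apply2, Prod.mk.injEq]
  refine ⟨by ring, by ring⟩

lemma apply3_npow (k : Nat) :
    apply3 (npow3 (1, 0, 1, 1, 0, 0, 0, 1, 0) k) (1, 1, 1)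
      = (narF (k + 2), narF (k + 1), narF k) := by
  induction k with
  | zero => decide
  | succ k ih =>
    simp only [npow3, apply3_mul, ih]
    simp only [apply3, narF_add3]
    norm_num

lemma apply2_npow (k : Nat) :
    apply2 (npow2 (1, 1, 1, 0) k) (1, 2) = (lucF (k + 1), lucF k) := by
  induction k with
  | zero => decide
  | succ k ih =>
    simp only [npow2, apply2_mul, ih]
    simp only [apply2, lucF_add2]
    norm_num

lemma row3_sum (t : M3) : t.1 + t.2.1 + t.2.2.1 = (apply3 t (1, 1, 1)).1 := by
  simp [apply3]

lemma row2_sum (t : M2) : t.1 + t.2.1 * 2 = (apply2 t (1, 2)).1 := by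
  simp [apply2]

-- ===== VERDICT (by name: the statement is the Claim_ definition above) =====
theorem numbers_sum_spec : Claim_equal_numbers_sum := by
  intro n _
  unfold Spec_numbers_sum numbers_sum numbers_sum_alt
  by_cases h1 : n < 1
  · simp [h1]
  by_cases h2 : n = 1
  · simp [h2]
  by_cases h3 : n = 2
  · simp [h3]
  simp only [h1, h2, h3, if_false]
  obtain ⟨m, rfl⟩ : ∃ m : Nat, n = (m : Int) := ⟨n.toNat, by omega⟩
  have hm : 2 ≤ m := by omega
  have ht : ((m : Int) + 1).toNat = m + 1 := by omega
  rw [foldA m hm, ht]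
  simp only
  rw [sumNar, sumLuc, row3_sum, row2_sum, matPow3_eq, matPow2_eq,
      apply3_npow, apply2_npow]
  ring_nf
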